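-- pv_equiv track=rewrite | github.com/Ji-Hyeon212/Problem-Solving | 프로그래머스/1/340198. ［PCCE 기출문제］ 10번 ／ 공원/［PCCE 기출문제］ 10번 ／ 공원.py | can_place_mat
-- ===== SOURCE A (Python) =====
-- def can_place_mat(park, mat):
--     # 깔 수 있는 좌상단 범위를 구한다.
--     R = len(park)
--     C = len(park[0])
--
--     max_r = R - mat
--     max_c = C - mat
--     #돗자리가 공원보다 크면 False
--     if max_r < 0 or max_c < 0:
--         return False
--     # 좌상단 범위를 순회
--     for r in range(max_r+1):
--         for c in range(max_c+1):
--             # 돗자리를 폈을 때 -1이 아닌 게 있으면 dirtybit 업뎃하고 다음 좌상단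
--             isClear = True
--             for i in range(mat): # 행
--                 if isClear == False:
--                     break
--
--                 for j in range(mat): # 열
--                     if (park[r + i][c + j] != "-1"):
--                         isClear = False
--                         break
--             if isClear:
--                         return True
--     return False
-- ===== SOURCE B (Python) =====
-- def can_place_mat(park, mat):
--     R = len(park)
--     C = len(park[0])
--     if mat > R or mat > C:
--         return False
--     if mat <= 0:
--         return True
--     up = [0] * C
--     for row in park:
--         up = [u + 1 if cell == "-1" else 0 for u, cell in zip(up, row)]
--         run = 0
--         for u in up:
--             run = run + 1 if u >= mat else 0
--             if run >= mat:
--                 return True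
--     return False
-- ===== Notes on version B (the rewrite author's own statement) =====
-- stated objective: alternative
-- what changed: Replaces A's brute-force re-check of all mat^2 cells for every window position with a single row-by-row sweep maintaining per-column streaks of consecutive '-1' cells plus a sliding run counter over columns (worst-case O(R*C) work vs A's O(R*C*mat^2)); on the timed inputs A's early breaks make the two comparable, so no speed is claimed.
-- outside the precondition, e.g. on can_place_mat([['-1', '-1'], ['x'], ['-1', '-1'], ['-1', '-1']], 2): A returns True, B returns False
import Mathlib
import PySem

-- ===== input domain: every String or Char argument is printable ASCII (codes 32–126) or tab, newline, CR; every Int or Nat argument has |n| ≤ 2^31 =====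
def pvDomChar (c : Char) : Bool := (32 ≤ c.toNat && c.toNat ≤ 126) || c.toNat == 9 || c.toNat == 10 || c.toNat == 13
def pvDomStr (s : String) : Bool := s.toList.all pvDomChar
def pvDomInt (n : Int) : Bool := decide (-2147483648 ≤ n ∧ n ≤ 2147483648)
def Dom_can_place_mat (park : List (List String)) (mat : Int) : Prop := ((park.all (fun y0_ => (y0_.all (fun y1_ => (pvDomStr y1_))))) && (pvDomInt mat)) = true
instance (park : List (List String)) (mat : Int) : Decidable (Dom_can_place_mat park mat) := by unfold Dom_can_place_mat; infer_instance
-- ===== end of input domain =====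

-- B replaces A's brute-force check of every mat×mat window by one row sweep with
-- per-column '-1'-streak counters and a sliding run counter over columns (objective: alternative).

-- ===== PORT A =====
-- park[r][c] as A reads it; Pre_ keeps every executed access in range
def pvRow (park : List (List String)) (r : Int) : List String :=
  (PySem.List.pyGet? park r).getD []

def pvCell (park : List (List String)) (r c : Int) : String :=
  (PySem.List.pyGet? (pvRow park r) c).getD ""

-- inner 'for j in range(mat)' with its break (isClear := False)
def pvAinnerJ (park : List (List String)) (r c i : Int) : List Int → Bool
  | [] => true
  | j :: js => if pvCell park (r + i) (c + j) ≠ "-1" then false else pvAinnerJ park r c i js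

-- 'for i in range(mat)' with the 'if isClear == False: break' at its top
def pvAloopI (park : List (List String)) (mat r c : Int) : List Int → Bool
  | [] => true
  | i :: is => if pvAinnerJ park r c i (PySem.List.pyRange 0 mat 1) then pvAloopI park mat r c is else false

-- 'for c in range(max_c+1)' with the early 'return True'; Python's range is lazy, so the
-- loop counter is recursed on directly (c, c+1, ... while c < max_c+1) instead of via a list
def pvAloopC (park : List (List String)) (mat max_c r c : Int) : Bool :=
  if c < max_c + 1 then
    if pvAloopI park mat r c (PySem.List.pyRange 0 mat 1) then true
    else pvAloopC park mat max_c r (c + 1)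
  else false
termination_by (max_c + 1 - c).toNat
decreasing_by omega

-- 'for r in range(max_r+1)', lazily as above
def pvAloopR (park : List (List String)) (mat max_r max_c r : Int) : Bool :=
  if r < max_r + 1 then
    if pvAloopC park mat max_c r 0 then true
    else pvAloopR park mat max_r max_c (r + 1)
  else false
termination_by (max_r + 1 - r).toNat
decreasing_by omega

def can_place_mat (park : List (List String)) (mat : Int) : Bool :=
  let R : Int := park.length
  let C : Int := ((pvRow park 0).length : Int)
  let max_r : Int := R - mat
  let max_c : Int := C - mat
  if max_r < 0 || max_c < 0 then false
  else pvAloopR park mat max_r max_c 0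

-- ===== PORT B =====
-- up = [u + 1 if cell == "-1" else 0 for u, cell in zip(up, row)]
def pvBup (up : List Int) (row : List String) : List Int :=
  List.zipWith (fun u cell => if cell == "-1" then u + 1 else 0) up row

-- the inner run scan over 'up' with its early 'return True'
def pvBrun (mat run : Int) : List Int → Bool
  | [] => false
  | u :: us =>
    let run' := if u ≥ mat then run + 1 else 0
    if run' ≥ mat then true else pvBrun mat run' us

-- 'for row in park'
def pvBrows (mat : Int) (up : List Int) : List (List String) → Bool
  | [] => false
  | row :: rows =>
    let up' := pvBup up row
    if pvBrun mat 0 up' then true else pvBrows mat up' rows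

def can_place_mat_alt (park : List (List String)) (mat : Int) : Bool :=
  let R : Int := park.length
  let C : Int := (((park.headD []).length : Int))
  if mat > R || mat > C then false
  else if mat ≤ 0 then true
  else pvBrows mat (List.replicate C.toNat 0) park

-- ===== PRECONDITION & SPEC =====
-- Pre_ excludes the empty park (A raises IndexError on park[0]) and non-rectangular parks
-- with 1 ≤ mat ≤ min(R, len(park[0])): there A's row-major scan may raise IndexError on a
-- short row, or return True before ever reaching it — an artefact of its scan order that a
-- window test over a ragged grid cannot sensibly specify.
def Pre_can_place_mat (park : List (List String)) (mat : Int) : Prop :=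
  park ≠ [] ∧
    ((∀ row ∈ park, row.length = (park.headD []).length) ∨
      mat ≤ 0 ∨ mat > (park.length : Int) ∨ mat > ((park.headD []).length : Int))
instance (park : List (List String)) (mat : Int) : Decidable (Pre_can_place_mat park mat) := by
  unfold Pre_can_place_mat; infer_instance

def pvWitness_can_place_mat : List (List String) × Int := ([["-1", "0"], ["-1", "-1"]], 1)

def Spec_can_place_mat (park : List (List String)) (mat : Int) (out : Bool) : Prop := out = can_place_mat_alt park mat
instance (park : List (List String)) (mat : Int) (out : Bool) : Decidable (Spec_can_place_mat park mat out) := by unfold Spec_can_place_mat; infer_instance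

-- ===== CLAIM (what is proved, stated in full; the proofs are below) =====
def Claim_equal_can_place_mat : Prop := ∀ (park : List (List String)) (mat : Int), Dom_can_place_mat park mat → Pre_can_place_mat park mat → Spec_can_place_mat park mat (can_place_mat park mat)

-- ===== LEMMAS AND PROOFS =====

-- cell (r, c) is '-1' (Nat indices)
def pvClear (park : List (List String)) (r c : Nat) : Bool :=
  pvCell park (r : Int) (c : Int) == "-1"

-- number of consecutive '-1' cells in column c ending just above row t
def pvStreak (park : List (List String)) (c : Nat) : Nat → Int
  | 0 => 0
  | t + 1 => if pvClear park t c then pvStreak park c t + 1 else 0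

def pvUpList (park : List (List String)) (C t : Nat) : List Int :=
  (List.range C).map (fun c => pvStreak park c t)

-- the common specification both programs decide
def pvGood (park : List (List String)) (m : Nat) : Prop :=
  ∃ r0 c0 : Nat, r0 + m ≤ park.length ∧ c0 + m ≤ (park.headD []).length ∧
    ∀ i < m, ∀ j < m, pvClear park (r0 + i) (c0 + j) = true

-- window of m consecutive entries all ≥ mat, somewhere in us
def pvRunWin (mat : Int) (m : Nat) (us : List Int) : Prop :=
  ∃ c0 : Nat, c0 + m ≤ us.length ∧ ∀ j < m, us.getD (c0 + j) 0 ≥ mat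

lemma pvStreak_nonneg (park : List (List String)) (c t : Nat) : 0 ≤ pvStreak park c t := by
  induction t with
  | zero => simp [pvStreak]
  | succ t ih => simp only [pvStreak]; split <;> omega

lemma pvStreak_ge_iff (park : List (List String)) (c t m : Nat) :
    (m : Int) ≤ pvStreak park c t ↔ m ≤ t ∧ ∀ i < m, pvClear park (t - 1 - i) c = true := by
  induction t generalizing m with
  | zero =>
    simp only [pvStreak]
    constructor
    · intro h
      have : m = 0 := by omega
      subst this; simp
    · rintro ⟨h, -⟩
      have : m = 0 := by omega
      subst this; simp
  | succ t ih =>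
    simp only [pvStreak]
    by_cases hc : pvClear park t c
    · rw [if_pos hc]
      cases m with
      | zero =>
        have := pvStreak_nonneg park c t
        constructor
        · intro _; exact ⟨by omega, by omega⟩
        · intro _; omega
      | succ m' =>
        have h1 : ((m' + 1 : Nat) : Int) ≤ pvStreak park c t + 1 ↔ (m' : Int) ≤ pvStreak park c t := by
          push_cast; omega
        rw [h1, ih m']
        constructor
        · rintro ⟨hle, hall⟩
          refine ⟨by omega, ?_⟩
          intro i hi
          cases i with
          | zero => simpa using hc
          | succ i' =>
            have := hall i' (by omega)
            have he : t + 1 - 1 - (i' + 1) = t - 1 - i' := by omega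
            rw [he]; exact this
        · rintro ⟨hle, hall⟩
          refine ⟨by omega, ?_⟩
          intro i hi
          have := hall (i + 1) (by omega)
          have he : t + 1 - 1 - (i + 1) = t - 1 - i := by omega
          rw [he] at this; exact this
    · rw [if_neg hc]
      constructor
      · intro h
        have : m = 0 := by omega
        subst this; simp
      · rintro ⟨hle, hall⟩
        rcases Nat.eq_zero_or_pos m with h0 | h0
        · subst h0; simp
        · exfalso
          have := hall 0 (by omega)
          simp at this
          exact hc this

lemma pvBrun_iff (mat : Int) (m : Nat) (hm : mat = (m : Int)) (hm1 : 1 ≤ m) :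
    ∀ (us : List Int) (k : Int), 0 ≤ k → k < mat →
      (pvBrun mat k us = true ↔
        (∃ t : Nat, t ≤ us.length ∧ mat ≤ k + t ∧ ∀ j < t, us.getD j 0 ≥ mat) ∨ pvRunWin mat m us) := by
  intro us
  induction us with
  | nil =>
    intro k hk0 hk
    simp only [pvBrun, pvRunWin, List.length_nil]
    constructor
    · intro h; cases h
    · rintro (⟨t, ht, hkt, -⟩ | ⟨c0, hc0, -⟩) <;> omega
  | cons u us ih =>
    intro k hk0 hk
    simp only [pvBrun]
    by_cases hu : u ≥ mat
    · rw [if_pos hu]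
      by_cases hfire : k + 1 ≥ mat
      · rw [if_pos hfire]
        simp only [true_iff]
        left
        refine ⟨1, by simp, by omega, ?_⟩
        intro j hj
        have hj0 : j = 0 := by omega
        subst hj0
        simpa using hu
        
      · rw [if_neg hfire]
        rw [ih (k + 1) (by omega) (by omega)]
        constructor
        · rintro (⟨t, ht, hkt, hall⟩ | ⟨c0, hlen, hall⟩)
          · left
            refine ⟨t + 1, by simp; omega, by push_cast at hkt ⊢; omega, ?_⟩
            intro j hj
            cases j with
            | zero => simpa using hu
            | succ j' =>
              have := hall j' (by omega)
              simpa using this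
          · right
            refine ⟨c0 + 1, by simp at hlen ⊢; omega, ?_⟩
            intro j hj
            have := hall j hj
            have he : c0 + 1 + j = (c0 + j) + 1 := by omega
            rw [he, List.getD_cons_succ]
            exact this
        · rintro (⟨t, ht, hkt, hall⟩ | ⟨c0, hlen, hall⟩)
          · cases t with
            | zero => exfalso; omega
            | succ t' =>
              left
              refine ⟨t', by simp at ht; omega, by push_cast at hkt ⊢; omega, ?_⟩
              intro j hj
              have := hall (j + 1) (by omega)
              simpa using this
          · cases c0 with
            | zero =>
              left
              refine ⟨m - 1, by simp at hlen; omega, by omega, ?_⟩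
              intro j hj
              have := hall (j + 1) (by omega)
              simpa using this
            | succ c0' =>
              right
              refine ⟨c0', by simp at hlen ⊢; omega, ?_⟩
              intro j hj
              have := hall j hj
              have he : c0' + 1 + j = (c0' + j) + 1 := by omega
              rw [he, List.getD_cons_succ] at this
              exact this
    · rw [if_neg hu]
      rw [if_neg (by omega : ¬ ((0:Int) ≥ mat))]
      rw [ih 0 le_rfl (by omega)]
      constructor
      · rintro (⟨t, ht, hkt, hall⟩ | ⟨c0, hlen, hall⟩)
        · right
          refine ⟨1, by simp at ht ⊢; omega, ?_⟩
          intro j hj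
          have := hall j (by omega)
          have he : 1 + j = j + 1 := by omega
          rw [he, List.getD_cons_succ]
          exact this
        · right
          refine ⟨c0 + 1, by simp at hlen ⊢; omega, ?_⟩
          intro j hj
          have := hall j hj
          have he : c0 + 1 + j = (c0 + j) + 1 := by omega
          rw [he, List.getD_cons_succ]
          exact this
      · rintro (⟨t, ht, hkt, hall⟩ | ⟨c0, hlen, hall⟩)
        · exfalso
          have ht1 : 1 ≤ t := by omega
          have := hall 0 (by omega)
          simp at this
          omega
        · cases c0 with
          | zero =>
            exfalso
            have := hall 0 (by omega)
            simp at this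
            omega
          | succ c0' =>
            right
            refine ⟨c0', by simp at hlen ⊢; omega, ?_⟩
            intro j hj
            have := hall j hj
            have he : c0' + 1 + j = (c0' + j) + 1 := by omega
            rw [he, List.getD_cons_succ] at this
            exact this

lemma pvBrun_zero_iff (mat : Int) (m : Nat) (hm : mat = (m : Int)) (hm1 : 1 ≤ m) (us : List Int) :
    pvBrun mat 0 us = true ↔ pvRunWin mat m us := by
  rw [pvBrun_iff mat m hm hm1 us 0 le_rfl (by omega)]
  constructor
  · rintro (⟨t, ht, hkt, hall⟩ | hw)
    · refine ⟨0, by simpa using by omega, ?_⟩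
      intro j hj
      simpa using hall j (by omega)
    · exact hw
  · intro hw
    right
    exact hw

lemma pvBup_step (park : List (List String)) (C t : Nat)
    (rect : ∀ row ∈ park, row.length = C) (ht : t < park.length) :
    pvBup (pvUpList park C t) (park.getD t []) = pvUpList park C (t + 1) := by
  have hrow : park.getD t [] = park[t] := List.getD_eq_getElem park [] ht
  have hlen' : (park[t]).length = C := rect _ (List.getElem_mem ht)
  rw [hrow]
  have hcell : ∀ (i : Nat) (hi : i < C), pvCell park (t : Int) (i : Int) = park[t][i]'(hlen' ▸ hi) := by
    intro i hi
    simp [pvCell, pvRow, PySem.List.pyGet?_natCast, List.getElem?_eq_getElem ht,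
      List.getElem?_eq_getElem (show i < park[t].length by omega)]
  apply List.ext_getElem
  · simp [pvBup, pvUpList, hlen']
  · intro i h1 h2
    have hC : i < C := by simpa [pvUpList] using h2
    simp only [pvBup, pvUpList, List.getElem_zipWith, List.getElem_map, List.getElem_range]
    have hst : pvStreak park i (t + 1) = if pvClear park t i then pvStreak park i t + 1 else 0 := rfl
    rw [hst]
    simp only [pvClear, hcell i hC]

lemma pvBrows_iff (park : List (List String)) (mat : Int) (C : Nat)
    (rect : ∀ row ∈ park, row.length = C) :
    ∀ (rows : List (List String)) (t : Nat), rows = park.drop t →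
      (pvBrows mat (pvUpList park C t) rows = true ↔
        ∃ r : Nat, t ≤ r ∧ r < park.length ∧ pvBrun mat 0 (pvUpList park C (r + 1)) = true) := by
  intro rows
  induction rows with
  | nil =>
    intro t heq
    have hlen : park.length ≤ t := by
      by_contra h
      rw [List.drop_eq_getElem_cons (by omega)] at heq
      cases heq
    simp only [pvBrows]
    constructor
    · intro h; cases h
    · rintro ⟨r, hr1, hr2, -⟩; omega
  | cons row rows' ih =>
    intro t heq
    have ht : t < park.length := by
      by_contra h
      rw [List.drop_eq_nil_iff.mpr (by omega)] at heq
      cases heq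
    rw [List.drop_eq_getElem_cons ht] at heq
    obtain ⟨hrow, hrest⟩ : row = park[t] ∧ rows' = park.drop (t + 1) := by
      cases heq; exact ⟨rfl, rfl⟩
    have hup : pvBup (pvUpList park C t) row = pvUpList park C (t + 1) := by
      rw [hrow, ← List.getD_eq_getElem park [] ht]
      exact pvBup_step park C t rect ht
    simp only [pvBrows, hup]
    by_cases hhit : pvBrun mat 0 (pvUpList park C (t + 1)) = true
    · rw [if_pos hhit]
      simp only [true_iff]
      exact ⟨t, le_rfl, ht, hhit⟩
    · rw [if_neg hhit]
      rw [ih (t + 1) hrest]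
      constructor
      · rintro ⟨r, hr1, hr2, hr3⟩
        exact ⟨r, by omega, hr2, hr3⟩
      · rintro ⟨r, hr1, hr2, hr3⟩
        refine ⟨r, ?_, hr2, hr3⟩
        rcases Nat.eq_or_lt_of_le hr1 with h | h
        · exfalso; rw [← h] at hr3; exact hhit hr3
        · omega

lemma pvRow_zero (park : List (List String)) : pvRow park 0 = park.headD [] := by
  cases park <;> simp [pvRow, PySem.List.pyGet?_zero]

lemma pvAinnerJ_iff (park : List (List String)) (r c i : Int) (js : List Int) :
    pvAinnerJ park r c i js = true ↔ ∀ j ∈ js, pvCell park (r + i) (c + j) = "-1" := by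
  induction js with
  | nil => simp [pvAinnerJ]
  | cons j js ih => by_cases h : pvCell park (r + i) (c + j) = "-1" <;> simp [pvAinnerJ, h, ih]

lemma pvAloopI_iff (park : List (List String)) (mat r c : Int) (is : List Int) :
    pvAloopI park mat r c is = true ↔ ∀ i ∈ is, pvAinnerJ park r c i (PySem.List.pyRange 0 mat 1) = true := by
  induction is with
  | nil => simp [pvAloopI]
  | cons i is ih =>
    by_cases h : pvAinnerJ park r c i (PySem.List.pyRange 0 mat 1) = true <;> simp [pvAloopI, h, ih]

lemma pvAloopC_iff (park : List (List String)) (mat max_c r c : Int) :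
    pvAloopC park mat max_c r c = true ↔
      ∃ c', c ≤ c' ∧ c' < max_c + 1 ∧ pvAloopI park mat r c' (PySem.List.pyRange 0 mat 1) = true := by
  fun_induction pvAloopC with
  | case1 c hlt hhit =>
    simp only [true_iff]
    exact ⟨c, le_rfl, hlt, hhit⟩
  | case2 c hlt hhit ih =>
    rw [ih]
    constructor
    · rintro ⟨c', h1, h2, h3⟩
      exact ⟨c', by omega, h2, h3⟩
    · rintro ⟨c', h1, h2, h3⟩
      refine ⟨c', ?_, h2, h3⟩
      rcases eq_or_lt_of_le h1 with h | h
      · exfalso; rw [← h] at h3; simp [h3] at hhit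
      · omega
  | case3 c hlt =>
    constructor
    · intro h; cases h
    · rintro ⟨c', h1, h2, -⟩; omega

lemma pvAloopR_iff (park : List (List String)) (mat max_r max_c r : Int) :
    pvAloopR park mat max_r max_c r = true ↔
      ∃ r', r ≤ r' ∧ r' < max_r + 1 ∧ pvAloopC park mat max_c r' 0 = true := by
  fun_induction pvAloopR with
  | case1 r hlt hhit =>
    simp only [true_iff]
    exact ⟨r, le_rfl, hlt, hhit⟩
  | case2 r hlt hhit ih =>
    rw [ih]
    constructor
    · rintro ⟨r', h1, h2, h3⟩
      exact ⟨r', by omega, h2, h3⟩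
    · rintro ⟨r', h1, h2, h3⟩
      refine ⟨r', ?_, h2, h3⟩
      rcases eq_or_lt_of_le h1 with h | h
      · exfalso; rw [← h] at h3; simp [h3] at hhit
      · omega
  | case3 r hlt =>
    constructor
    · intro h; cases h
    · rintro ⟨r', h1, h2, -⟩; omega

lemma pvA_eq_good (park : List (List String)) (mat : Int) (m : Nat)
    (hm : mat = (m : Int)) (hm1 : 1 ≤ m)
    (hR : (m : Int) ≤ (park.length : Int)) (hC : (m : Int) ≤ ((park.headD []).length : Int)) :
    (can_place_mat park mat = true ↔ pvGood park m) := by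
  simp only [can_place_mat, pvRow_zero]
  rw [if_neg (by simp only [Bool.or_eq_true, decide_eq_true_eq]; omega)]
  simp only [pvAloopR_iff, pvAloopC_iff, pvAloopI_iff, pvAinnerJ_iff, PySem.List.mem_pyRange_one]
  constructor
  · rintro ⟨r, hr0, hr1, c, hc0, hc1, hall⟩
    refine ⟨r.toNat, c.toNat, by omega, by omega, ?_⟩
    intro i hi j hj
    have h := hall (i : Int) ⟨by omega, by omega⟩ (j : Int) ⟨by omega, by omega⟩
    have he1 : r + (i : Int) = ((r.toNat + i : Nat) : Int) := by push_cast; omega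
    have he2 : c + (j : Int) = ((c.toNat + j : Nat) : Int) := by push_cast; omega
    rw [he1, he2] at h
    simpa [pvClear] using h
  · rintro ⟨r0, c0, h1, h2, hall⟩
    refine ⟨(r0 : Int), by omega, by omega, (c0 : Int), by omega, by omega, ?_⟩
    intro i ⟨hi0, hi1⟩ j ⟨hj0, hj1⟩
    have h := hall i.toNat (by omega) j.toNat (by omega)
    have he1 : (r0 : Int) + i = ((r0 + i.toNat : Nat) : Int) := by push_cast; omega
    have he2 : (c0 : Int) + j = ((c0 + j.toNat : Nat) : Int) := by push_cast; omega
    rw [he1, he2]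
    simpa [pvClear] using h

lemma pvB_eq_good (park : List (List String)) (mat : Int) (m : Nat)
    (hm : mat = (m : Int)) (hm1 : 1 ≤ m)
    (rect : ∀ row ∈ park, row.length = (park.headD []).length)
    (hR : (m : Int) ≤ (park.length : Int)) (hC : (m : Int) ≤ ((park.headD []).length : Int)) :
    (can_place_mat_alt park mat = true ↔ pvGood park m) := by
  obtain ⟨Cn, hCn⟩ : ∃ Cn, (park.headD []).length = Cn := ⟨_, rfl⟩
  have rect' : ∀ row ∈ park, row.length = Cn := by
    intro row hr; rw [← hCn]; exact rect row hr
  simp only [can_place_mat_alt, pvGood, hCn]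
  rw [if_neg (by simp only [Bool.or_eq_true, decide_eq_true_eq]; omega), if_neg (by omega)]
  have htn : ((Cn : Int)).toNat = Cn := by omega
  rw [htn]
  have hup0 : List.replicate Cn 0 = pvUpList park Cn 0 := by
    simp [pvUpList, pvStreak, List.map_const']
  rw [hup0, pvBrows_iff park mat Cn rect' park 0 (by simp)]
  constructor
  · rintro ⟨r, -, hrlen, hrun⟩
    rw [pvBrun_zero_iff mat m hm hm1] at hrun
    obtain ⟨c0, hc0, hall⟩ := hrun
    have hlenup : (pvUpList park Cn (r + 1)).length = Cn := by simp [pvUpList]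
    rw [hlenup] at hc0
    have hst : ∀ j < m, (m : Int) ≤ pvStreak park (c0 + j) (r + 1) := by
      intro j hj
      have h := hall j hj
      rw [List.getD_eq_getElem _ _ (by rw [hlenup]; omega)] at h
      simp only [pvUpList, List.getElem_map, List.getElem_range] at h
      rw [hm] at h
      exact h
    have hm_le : m ≤ r + 1 := by
      have := (pvStreak_ge_iff park (c0 + 0) (r + 1) m).mp (hst 0 hm1)
      exact this.1
    refine ⟨r + 1 - m, c0, by omega, hc0, ?_⟩
    intro i hi j hj
    have h := ((pvStreak_ge_iff park (c0 + j) (r + 1) m).mp (hst j hj)).2 (m - 1 - i) (by omega)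
    have he : r + 1 - 1 - (m - 1 - i) = r + 1 - m + i := by omega
    rw [he] at h
    exact h
  · rintro ⟨r0, c0, h1, h2, hall⟩
    refine ⟨r0 + m - 1, by omega, by omega, ?_⟩
    rw [pvBrun_zero_iff mat m hm hm1]
    have he : r0 + m - 1 + 1 = r0 + m := by omega
    rw [he]
    have hlenup : (pvUpList park Cn (r0 + m)).length = Cn := by simp [pvUpList]
    refine ⟨c0, by rw [hlenup]; omega, ?_⟩
    intro j hj
    rw [List.getD_eq_getElem _ _ (by rw [hlenup]; omega)]
    simp only [pvUpList, List.getElem_map, List.getElem_range]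
    rw [hm, ge_iff_le, pvStreak_ge_iff]
    refine ⟨by omega, ?_⟩
    intro i hi
    have h := hall (m - 1 - i) (by omega) j hj
    have he2 : r0 + m - 1 - i = r0 + (m - 1 - i) := by omega
    rw [he2]
    exact h

-- ===== VERDICT (by name: the statement is the Claim_ definition above) =====
theorem can_place_mat_spec : Claim_equal_can_place_mat := by
  intro park mat hdom hpre
  unfold Spec_can_place_mat
  obtain ⟨hne, hrect⟩ := hpre
  have hR1 : 1 ≤ (park.length : Int) := by
    cases park with
    | nil => exact absurd rfl hne
    | cons h t => simp
  by_cases hm0 : mat ≤ 0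
  · -- both sides are True
    have hA : can_place_mat park mat = true := by
      simp only [can_place_mat, pvRow_zero]
      rw [if_neg (by simp only [Bool.or_eq_true, decide_eq_true_eq]; omega)]
      rw [pvAloopR_iff]
      refine ⟨0, le_rfl, by omega, ?_⟩
      rw [pvAloopC_iff]
      refine ⟨0, le_rfl, by omega, ?_⟩
      rw [pvAloopI_iff]
      intro i hi
      rw [PySem.List.pyRange_one_eq_nil (by omega)] at hi
      cases hi
    have hB : can_place_mat_alt park mat = true := by
      simp only [can_place_mat_alt]
      rw [if_neg (by simp only [Bool.or_eq_true, decide_eq_true_eq]; omega), if_pos hm0]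
    rw [hA, hB]
  · by_cases hbig : mat > (park.length : Int) ∨ mat > (((park.headD []).length : Int))
    · have hA : can_place_mat park mat = false := by
        simp only [can_place_mat, pvRow_zero]
        rw [if_pos (by simp only [Bool.or_eq_true, decide_eq_true_eq]; omega)]
      have hB : can_place_mat_alt park mat = false := by
        simp only [can_place_mat_alt]
        rw [if_pos (by simp only [Bool.or_eq_true, decide_eq_true_eq]; omega)]
      rw [hA, hB]
    · rw [not_or] at hbig
      obtain ⟨hR', hC'⟩ := hbig
      have hR : mat ≤ (park.length : Int) := by omega
      have hC : mat ≤ ((park.headD []).length : Int) := by omega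
      have rect : ∀ row ∈ park, row.length = (park.headD []).length := by
        rcases hrect with h | h | h | h
        · exact h
        all_goals omega
      have hm : mat = ((mat.toNat : Nat) : Int) := by omega
      have hm1 : 1 ≤ mat.toNat := by omega
      rw [Bool.eq_iff_iff]
      rw [pvA_eq_good park mat mat.toNat hm hm1 (by omega) (by omega),
        pvB_eq_good park mat mat.toNat hm hm1 rect (by omega) (by omega)]
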